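-- pv_equiv track=rewrite | github.com/florolf/spic | compiler/compiler.py | eval_quorum
-- ===== SOURCE A (Python) =====
-- def eval_quorum(operations: list[tuple[int, int, int]], witnesses: set[int]) -> bool:
--     stack = []
--
--     ww = 0
--     for i in witnesses:
--         ww |= 1 << i
--
--     for threshold, n_children, n_witnesses in operations:
--         level = 0
--
--         for _ in range(0, n_children):
--             level += stack.pop()
--
--         for _ in range(0, n_witnesses):
--             if ww & 1:
--                 level += 1
--
--             ww >>= 1
--
--         if level >= threshold:
--             stack.append(1)
--         else:
--             stack.append(0)
--
--     if len(stack) != 1: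
--         raise RuntimeError(f'invalid stack size {len(stack)}')
--
--     return stack[0] == 1
-- ===== SOURCE B (Python) =====
-- def eval_quorum(operations: list[tuple[int, int, int]], witnesses: set[int]) -> bool:
--     # Pair every operation with its window of witness indices.
--     tagged = []
--     off = 0
--     for threshold, n_children, n_witnesses in operations:
--         window = range(off, off + n_witnesses)
--         tagged.append((threshold, n_children, window))
--         off += len(window)
--
--     # The operation list is a postfix encoding of a tree, so its reverse is a
--     # prefix (root-first) encoding: evaluate it by recursive descent.
--     ops = iter(reversed(tagged))
--
--     def node():
--         threshold, n_children, window = next(ops)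
--         level = sum(1 for w in witnesses if w in window)
--         for _ in range(n_children):
--             level += node()
--         return 1 if level >= threshold else 0
--
--     try:
--         bit = node()
--     except StopIteration:
--         raise RuntimeError('invalid quorum tree')
--     if next(ops, None) is not None:
--         raise RuntimeError('invalid quorum tree')
--     return bit == 1
-- ===== Notes on version B (the rewrite author's own statement) =====
-- stated objective: alternative
-- what changed: B evaluates the quorum tree by recursive descent from the root over the reversed operation list (a prefix encoding), counting each node's witnesses in a precomputed offset window (a range object), instead of A's forward postfix stack machine that shifts a witness bitmask one bit at a time; Pre_ excludes exactly the inputs where A raises (negative witness, stack underflow, final stack size != 1).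
import Mathlib
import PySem

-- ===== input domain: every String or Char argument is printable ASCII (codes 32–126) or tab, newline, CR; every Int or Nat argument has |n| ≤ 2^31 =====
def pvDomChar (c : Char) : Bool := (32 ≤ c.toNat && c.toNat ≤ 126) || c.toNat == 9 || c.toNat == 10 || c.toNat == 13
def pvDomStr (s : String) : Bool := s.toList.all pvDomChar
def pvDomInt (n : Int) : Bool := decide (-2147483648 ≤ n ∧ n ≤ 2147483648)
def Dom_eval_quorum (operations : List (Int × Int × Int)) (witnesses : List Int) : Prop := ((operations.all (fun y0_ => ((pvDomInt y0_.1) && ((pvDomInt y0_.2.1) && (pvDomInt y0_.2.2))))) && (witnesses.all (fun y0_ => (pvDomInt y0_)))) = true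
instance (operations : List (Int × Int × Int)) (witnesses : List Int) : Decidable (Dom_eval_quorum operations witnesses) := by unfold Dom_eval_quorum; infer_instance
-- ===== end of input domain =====

-- B evaluates the quorum tree by recursive descent from the root over the
-- reversed operation list (prefix encoding), counting each node's witnesses in
-- a precomputed offset window, instead of A's forward postfix stack machine
-- with a one-bit-at-a-time witness bitmask; objective: alternative.

-- ===== PORT A =====
-- one step of A's main loop: pop n_children values, then shift n_witnesses bits out of ww
def evalQuorumStepA (st : List Int × Nat) (op : Int × Int × Int) : List Int × Nat :=
  let p := (PySem.List.pyRange 0 op.2.1 1).foldl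
      (fun (p : Int × List Int) _ => (p.1 + p.2.headD 0, p.2.tail)) ((0 : Int), st.1)
  let q := (PySem.List.pyRange 0 op.2.2 1).foldl
      (fun (q : Int × Nat) _ => ((if q.2 % 2 = 1 then q.1 + 1 else q.1), q.2 / 2)) (p.1, st.2)
  ((if q.1 ≥ op.1 then (1 : Int) else 0) :: p.2, q.2)

def eval_quorum (operations : List (Int × Int × Int)) (witnesses : List Int) : Bool :=
  let ww : Nat := witnesses.foldl (fun acc i => acc ||| (1 <<< i.toNat)) 0
  let res := operations.foldl evalQuorumStepA ([], ww)
  -- Python raises RuntimeError when res.1.length ≠ 1; Pre_ excludes that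
  res.1.headD 0 == 1

-- ===== PORT B =====
-- the witness count of a node whose window is range(a, b): B iterates the
-- witness SET, so the port iterates its distinct elements (PySem.Set.ofList)
def pvWindowCount (ws : List Int) (a b : Int) : Int :=
  ((PySem.Set.ofList ws).countP (fun w => decide (a ≤ w ∧ w < b)) : Int)

-- Source B's recursive 'node' over the iterator of remaining root-first operations;
-- 'none' = the Python StopIteration/RuntimeError path (excluded by Pre_); the
-- fuel argument only makes the recursion structural (it never runs out when
-- the caller supplies list length + 1, as the proofs below show under Pre_)
-- the 'for _ in range(n_children): level += node()' loop, over a given node evaluator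
def childrenB (node : List (Int × Int × Int × Int) → Option (Int × List (Int × Int × Int × Int))) :
    Nat → Int → List (Int × Int × Int × Int) → Option (Int × List (Int × Int × Int × Int))
  | 0, lvl, rest => some (lvl, rest)
  | k + 1, lvl, rest =>
    match node rest with
    | none => none
    | some (b, rest') => childrenB node k (lvl + b) rest'

def nodeB (ws : List Int) : Nat → List (Int × Int × Int × Int) →
    Option (Int × List (Int × Int × Int × Int))
  | 0, _ => none
  | _ + 1, [] => none
  | f + 1, (t, nc, a, b) :: rest =>
    match childrenB (nodeB ws f) nc.toNat (pvWindowCount ws a b) rest with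
    | none => none
    | some (lvl, rest') => some (if lvl ≥ t then 1 else 0, rest')

def eval_quorum_alt (operations : List (Int × Int × Int)) (witnesses : List Int) : Bool :=
  -- pair every operation with its witness window range(off, off + nw);
  -- a range is its (start, stop) pair, len(range(a, b)) = (b - a).toNat
  let tagged := (operations.foldl
      (fun (p : List (Int × Int × Int × Int) × Int) op =>
        (p.1 ++ [(op.1, op.2.1, p.2, p.2 + op.2.2)], p.2 + ((op.2.2).toNat : Int))) ([], 0)).1
  -- evaluate the reversed (root-first) list by recursive descent
  match nodeB witnesses (tagged.length + 1) tagged.reverse with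
  | some (b, []) => b == 1
  | _ => false   -- Python raises RuntimeError here; Pre_ excludes these inputs

-- ===== PRECONDITION & SPEC =====
-- number of children popped by an operation (negative counts pop nothing)
def pvNCh (op : Int × Int × Int) : Nat := op.2.1.toNat
-- closed-form stack balance: every prefix leaves enough values to pop, final stack size is 1
def Bal_eval_quorum (operations : List (Int × Int × Int)) : Prop :=
  (∀ k < operations.length, ((operations.take (k + 1)).map pvNCh).sum ≤ k) ∧
  (operations.map pvNCh).sum + 1 = operations.length

-- Pre_ excludes exactly the inputs where A raises: a negative witness
-- (ValueError from 1 << i), stack underflow (IndexError), and a final stack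
-- size ≠ 1 (RuntimeError).
def Pre_eval_quorum (operations : List (Int × Int × Int)) (witnesses : List Int) : Prop :=
  (∀ w ∈ witnesses, 0 ≤ w) ∧ Bal_eval_quorum operations

instance (operations : List (Int × Int × Int)) (witnesses : List Int) :
    Decidable (Pre_eval_quorum operations witnesses) := by
  unfold Pre_eval_quorum Bal_eval_quorum; infer_instance

def pvWitness_eval_quorum : (List (Int × Int × Int)) × List Int := ([(1, 0, 1)], [0])

def Spec_eval_quorum (operations : List (Int × Int × Int)) (witnesses : List Int) (out : Bool) : Prop :=
  out = eval_quorum_alt operations witnesses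
instance (operations : List (Int × Int × Int)) (witnesses : List Int) (out : Bool) :
    Decidable (Spec_eval_quorum operations witnesses out) := by
  unfold Spec_eval_quorum; infer_instance

-- ===== CLAIM (what is proved, stated in full; the proofs are below) =====
def Claim_equal_eval_quorum : Prop := ∀ (operations : List (Int × Int × Int)) (witnesses : List Int), Dom_eval_quorum operations witnesses → Pre_eval_quorum operations witnesses → Spec_eval_quorum operations witnesses (eval_quorum operations witnesses)

-- ===== LEMMAS AND PROOFS =====

-- a fold that ignores its elements is an iterate
lemma pv_foldl_const {α β : Type} (f : α → α) (l : List β) (init : α) :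
    l.foldl (fun p _ => f p) init = f^[l.length] init := by
  induction l generalizing init with
  | nil => rfl
  | cons a t ih => simp [List.foldl_cons, ih, Function.iterate_succ_apply]

-- A's pop loop computes take/drop
lemma pv_pop_iter (m : Nat) : ∀ (s : List Int) (acc : Int),
    (fun p : Int × List Int => (p.1 + p.2.headD 0, p.2.tail))^[m] (acc, s) =
      (acc + (s.take m).sum, s.drop m) := by
  induction m with
  | zero => intro s acc; simp
  | succ m ih =>
    intro s acc
    rw [Function.iterate_succ_apply]
    show (fun p : Int × List Int => (p.1 + p.2.headD 0, p.2.tail))^[m] (acc + s.headD 0, s.tail)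
        = (acc + (s.take (m + 1)).sum, s.drop (m + 1))
    rw [ih]
    cases s with
    | nil => simp
    | cons a t => simp [add_assoc]

-- A's bit loop counts the low set bits and shifts
lemma pv_bit_iter (k : Nat) : ∀ (w : Nat) (acc : Int),
    (fun q : Int × Nat => ((if q.2 % 2 = 1 then q.1 + 1 else q.1), q.2 / 2))^[k] (acc, w) =
      (acc + ((List.range k).countP (fun j => w.testBit j) : Int), w >>> k) := by
  induction k with
  | zero => intro w acc; simp
  | succ k ih =>
    intro w acc
    rw [Function.iterate_succ_apply]
    show (fun q : Int × Nat => ((if q.2 % 2 = 1 then q.1 + 1 else q.1), q.2 / 2))^[k]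
        ((if w % 2 = 1 then acc + 1 else acc), w / 2)
        = (acc + (((List.range (k + 1)).countP (fun j => w.testBit j) : Nat) : Int), w >>> (k + 1))
    rw [ih]
    refine Prod.ext ?_ ?_
    · simp only [List.range_succ_eq_map, List.countP_cons, List.countP_map, Function.comp_def,
        Nat.testBit_succ, Nat.testBit_zero]
      push_cast
      split_ifs with h <;> simp_all
      ring
    · simp only [Nat.shiftRight_eq_div_pow, Nat.div_div_eq_div_mul, pow_succ]
      ring_nf

-- the initial bitmask has exactly the witnesses' bits set
lemma pv_mask_testBit (ws : List Int) : ∀ (acc : Nat) (n : Nat),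
    (ws.foldl (fun acc i => acc ||| (1 <<< i.toNat)) acc).testBit n =
      (acc.testBit n || ws.any (fun w => w.toNat == n)) := by
  induction ws with
  | nil => intro acc n; simp
  | cons w t ih =>
    intro acc n
    simp only [List.foldl_cons, List.any_cons, ih]
    simp only [Nat.testBit_or, Nat.one_shiftLeft, Nat.testBit_two_pow]
    rw [Bool.eq_iff_iff]
    simp only [Bool.or_eq_true, List.any_eq_true, decide_eq_true_eq, beq_iff_eq]
    tauto

lemma pv_mask_mem (ws : List Int) (h : ∀ w ∈ ws, 0 ≤ w) (n : Nat) :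
    (ws.foldl (fun acc i => acc ||| (1 <<< i.toNat)) 0).testBit n = decide ((n : Int) ∈ ws) := by
  rw [pv_mask_testBit]
  simp only [Nat.zero_testBit, Bool.false_or]
  rw [Bool.eq_iff_iff]
  simp only [List.any_eq_true, beq_iff_eq, decide_eq_true_eq]
  constructor
  · rintro ⟨w, hw, he⟩
    have := h w hw
    have : w = (n : Int) := by omega
    exact this ▸ hw
  · intro hn
    exact ⟨(n : Int), hn, by omega⟩

-- countP of a disjoint disjunction splits
lemma pv_countP_or {α : Type} (p q : α → Bool) :
    ∀ l : List α, (∀ x ∈ l, ¬(p x = true ∧ q x = true)) →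
      l.countP (fun x => p x || q x) = l.countP p + l.countP q := by
  intro l
  induction l with
  | nil => intro _; simp
  | cons a t ih =>
    intro h
    have ht := ih (fun x hx => h x (List.mem_cons_of_mem a hx))
    have ha := h a (List.mem_cons_self)
    simp only [List.countP_cons, ht]
    by_cases hp : p a = true <;> by_cases hq : q a = true <;> simp [hp, hq] at ha ⊢ <;> omega

-- counting one fixed value over a shifted range is an indicator
lemma pv_count_eq_range (w : Int) : ∀ (n : Nat) (a : Int),
    (List.range n).countP (fun (j : Nat) => decide (a + (j : Int) = w)) =
      if a ≤ w ∧ w < a + (n : Int) then 1 else 0 := by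
  intro n
  induction n with
  | zero =>
    intro a
    simp only [List.range_zero, List.countP_nil]
    rw [if_neg (by omega)]
  | succ n ih =>
    intro a
    rw [List.range_succ, List.countP_append, ih]
    simp only [List.countP_cons, List.countP_nil]
    have hc : ((n + 1 : Nat) : Int) = (n : Int) + 1 := by push_cast; ring
    rw [hc]
    split_ifs with h1 h2 h3 <;> simp_all <;> omega

-- the positions of a window that hit a duplicate-free set ↔ the set's elements in the window
lemma pv_cnt : ∀ (S : List Int), S.Nodup → ∀ (n : Nat) (a : Int),
    (List.range n).countP (fun (j : Nat) => decide ((a + (j : Int)) ∈ S)) =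
      S.countP (fun w => decide (a ≤ w ∧ w < a + (n : Int))) := by
  intro S
  induction S with
  | nil => intro _ n a; simp
  | cons w S' ih =>
    intro hnd n a
    rw [List.nodup_cons] at hnd
    have hsplit : (List.range n).countP (fun (j : Nat) => decide ((a + (j : Int)) ∈ w :: S')) =
        (List.range n).countP (fun (j : Nat) => decide (a + (j : Int) = w)) +
        (List.range n).countP (fun (j : Nat) => decide ((a + (j : Int)) ∈ S')) := by
      have heq : ∀ j : Nat, (decide ((a + (j : Int)) ∈ w :: S')) =
          ((fun (j : Nat) => decide (a + (j : Int) = w)) j ||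
           (fun (j : Nat) => decide ((a + (j : Int)) ∈ S')) j) := by
        intro j; simp [List.mem_cons]
      rw [List.countP_congr (fun j _ => by rw [heq j])]
      apply pv_countP_or
      intro j _
      simp only [decide_eq_true_eq, not_and]
      intro he hm
      exact hnd.1 (he ▸ hm)
    rw [hsplit, pv_count_eq_range, List.countP_cons, ih hnd.2 n a]
    simp only [decide_eq_true_eq]
    split_ifs <;> omega

-- A's bit count of a window equals B's set count of that window
lemma pv_bitcount_window (ws : List Int) (M : Nat)
    (hM : ∀ n : Nat, M.testBit n = decide ((n : Int) ∈ ws))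
    (off nw : Int) (hoff : 0 ≤ off) :
    ((List.range nw.toNat).countP (fun j => (M >>> off.toNat).testBit j) : Int) =
      pvWindowCount ws off (off + nw) := by
  unfold pvWindowCount
  congr 1
  have hstep : ∀ j : Nat, (M >>> off.toNat).testBit j =
      decide ((off + (j : Int)) ∈ PySem.Set.ofList ws) := by
    intro j
    rw [Nat.testBit_shiftRight, hM]
    have h1 : ((off.toNat + j : Nat) : Int) = off + (j : Int) := by omega
    simp [h1, PySem.Set.mem_ofList]
  rw [List.countP_congr (fun j _ => by rw [hstep j]),
    pv_cnt (PySem.Set.ofList ws) (PySem.Set.nodup_ofList ws) nw.toNat off]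
  refine List.countP_congr ?_
  intro w _
  simp only [decide_eq_true_eq]
  omega

-- ops paired with their running witness offsets (the reference form of Source B's tagging loop)
def pvTag : List (Int × Int × Int) → Int → List (Int × Int × Int × Int)
  | [], _ => []
  | op :: l, off => (op.1, op.2.1, off, off + op.2.2) :: pvTag l (off + ((op.2.2).toNat : Int))

lemma pv_tag_length : ∀ (ops : List (Int × Int × Int)) (off : Int),
    (pvTag ops off).length = ops.length := by
  intro ops
  induction ops with
  | nil => intro off; rfl
  | cons op l ih => intro off; simp [pvTag, ih]

def pvPc4 (op : Int × Int × Int × Int) : Nat := op.2.1.toNat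

lemma pv_tag_pc : ∀ (ops : List (Int × Int × Int)) (off : Int),
    (pvTag ops off).map pvPc4 = ops.map pvNCh := by
  intro ops
  induction ops with
  | nil => intro off; rfl
  | cons op l ih => intro off; simp [pvTag, ih, pvPc4, pvNCh]

-- the forward stack step of the tagged machine (proof-side reference semantics)
def pvSg (ws : List Int) (st : List Int) (op : Int × Int × Int × Int) : List Int :=
  (if pvWindowCount ws op.2.2.1 op.2.2.2 + (st.take op.2.1.toNat).sum ≥ op.1 then (1 : Int) else 0)
    :: st.drop op.2.1.toNat

-- one A-step is one tagged forward step, with the mask shifted by the consumed window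
lemma pv_stepA (ws : List Int) (M : Nat)
    (hM : ∀ n : Nat, M.testBit n = decide ((n : Int) ∈ ws))
    (st : List Int) (off : Int) (hoff : 0 ≤ off) (t nc nw : Int) :
    evalQuorumStepA (st, M >>> off.toNat) (t, nc, nw) =
      (pvSg ws st (t, nc, off, off + nw), M >>> (off + ((nw.toNat : Nat) : Int)).toNat) := by
  simp only [evalQuorumStepA, pvSg]
  rw [pv_foldl_const, pv_foldl_const, PySem.List.length_pyRange_one,
    PySem.List.length_pyRange_one, sub_zero, sub_zero, pv_pop_iter, pv_bit_iter]
  have hcnt := pv_bitcount_window ws M hM off nw hoff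
  have hsh : M >>> off.toNat >>> nw.toNat = M >>> (off + ((nw.toNat : Nat) : Int)).toNat := by
    rw [← Nat.shiftRight_add]
    congr 1
    omega
  refine Prod.ext ?_ ?_
  · simp only
    rw [← hcnt]
    refine congrArg (fun b => b :: st.drop nc.toNat) ?_
    refine if_congr ?_ rfl rfl
    constructor <;> intro <;> omega
  · exact hsh

-- the whole of A's main loop is the tagged forward fold
lemma pv_A2S (ws : List Int) (M : Nat)
    (hM : ∀ n : Nat, M.testBit n = decide ((n : Int) ∈ ws)) :
    ∀ (ops : List (Int × Int × Int)) (st : List Int) (off : Int), 0 ≤ off →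
      ops.foldl evalQuorumStepA (st, M >>> off.toNat) =
        ((pvTag ops off).foldl (pvSg ws) st,
         M >>> (off.toNat + (ops.map (fun op => (op.2.2).toNat)).sum)) := by
  intro ops
  induction ops with
  | nil => intro st off hoff; simp [pvTag]
  | cons op l ih =>
    intro st off hoff
    obtain ⟨t, nc, nw⟩ := op
    simp only [List.foldl_cons, pvTag]
    rw [pv_stepA ws M hM st off hoff t nc nw,
      ih (pvSg ws st (t, nc, off, off + nw)) (off + ((nw.toNat : Nat) : Int)) (by omega)]
    simp only [List.map_cons, List.sum_cons]
    refine congrArg (fun z => ((pvTag l (off + ((nw.toNat : Nat) : Int))).foldl (pvSg ws)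
      (pvSg ws st (t, nc, off, off + nw)), M >>> z)) ?_
    omega

-- Source B's tagging loop builds exactly pvTag
lemma pv_tag_foldl : ∀ (ops : List (Int × Int × Int))
    (acc : List (Int × Int × Int × Int)) (off : Int),
    (ops.foldl (fun (p : List (Int × Int × Int × Int) × Int) op =>
        (p.1 ++ [(op.1, op.2.1, p.2, p.2 + op.2.2)], p.2 + ((op.2.2).toNat : Int))) (acc, off)).1 =
      acc ++ pvTag ops off := by
  intro ops
  induction ops with
  | nil => intro acc off; simp [pvTag]
  | cons op l ih =>
    intro acc off
    simp only [List.foldl_cons, pvTag]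
    rw [ih]
    simp

-- invariant: the stack's values, top first, are the values of the trees whose
-- root-first encodings are laid out one after another at the front of R
def pvINV (ws : List Int) : List Int → List (Int × Int × Int × Int) → Prop
  | [], R => R = []
  | v :: st', R => ∃ j, (∀ f, R.length + 1 ≤ f → nodeB ws f R = some (v, R.drop j)) ∧
      pvINV ws st' (R.drop j)

-- the children loop pops the top k trees and adds their values
lemma pv_children (ws : List Int) : ∀ (k : Nat) (st : List Int)
    (R : List (Int × Int × Int × Int)), k ≤ st.length → pvINV ws st R →
    ∃ j, pvINV ws (st.drop k) (R.drop j) ∧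
      ∀ (acc : Int) (f : Nat), R.length + 1 ≤ f →
        childrenB (nodeB ws f) k acc R = some (acc + (st.take k).sum, R.drop j) := by
  intro k
  induction k with
  | zero =>
    intro st R _ hinv
    exact ⟨0, by simpa using hinv, fun acc f _ => by simp [childrenB]⟩
  | succ k ih =>
    intro st R hk hinv
    cases st with
    | nil => simp at hk
    | cons v st' =>
      obtain ⟨j, hnode, hinv'⟩ := hinv
      obtain ⟨j₂, hinv₂, hch⟩ := ih st' (R.drop j) (by simp at hk; omega) hinv'
      refine ⟨j + j₂, ?_, ?_⟩
      · rw [List.drop_succ_cons, ← List.drop_drop]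
        exact hinv₂
      · intro acc f hf
        have hf' : (R.drop j).length + 1 ≤ f := by
          have := List.length_drop (l := R) (i := j)
          omega
        rw [childrenB, hnode f hf]
        show childrenB (nodeB ws f) k (acc + v) (R.drop j) =
          some (acc + ((v :: st').take (k + 1)).sum, R.drop (j + j₂))
        rw [hch (acc + v) f hf', List.drop_drop]
        simp [add_assoc]

-- forward simulation: running the tagged machine extends the invariant
lemma pv_fwd (ws : List Int) : ∀ (L R : List (Int × Int × Int × Int)) (st : List Int),
    pvINV ws st R →
    (∀ k < L.length, ((L.take (k + 1)).map pvPc4).sum ≤ st.length + k) →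
    pvINV ws (L.foldl (pvSg ws) st) (L.reverse ++ R) ∧
      (L.foldl (pvSg ws) st).length + (L.map pvPc4).sum = st.length + L.length := by
  intro L
  induction L with
  | nil => intro R st hinv _; exact ⟨by simpa using hinv, by simp⟩
  | cons op L' ih =>
    intro R st hinv hbal
    obtain ⟨t, nc, wa, wb⟩ := op
    have hnc : nc.toNat ≤ st.length := by
      have := hbal 0 (by simp)
      simpa [pvPc4] using this
    obtain ⟨j₁, hinv₁, hch⟩ := pv_children ws nc.toNat st R hnc hinv
    have hstep : pvINV ws (pvSg ws st (t, nc, wa, wb)) ((t, nc, wa, wb) :: R) := by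
      simp only [pvSg, pvINV]
      refine ⟨j₁ + 1, ?_, ?_⟩
      · intro f hf
        match f, hf with
        | f' + 1, hf =>
          have hf' : R.length + 1 ≤ f' := by simp at hf; omega
          rw [nodeB, hch (pvWindowCount ws wa wb) f' hf']
          simp [List.drop_succ_cons]
      · simpa [List.drop_succ_cons] using hinv₁
    have hbal' : ∀ k < L'.length, ((L'.take (k + 1)).map pvPc4).sum ≤
        (pvSg ws st (t, nc, wa, wb)).length + k := by
      intro k hk
      have h2 := hbal (k + 1) (by simp; omega)
      simp only [List.take_succ_cons, List.map_cons, List.sum_cons] at h2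
      have hlen : (pvSg ws st (t, nc, wa, wb)).length = st.length - nc.toNat + 1 := by
        simp [pvSg]
      have : pvPc4 (t, nc, wa, wb) = nc.toNat := rfl
      omega
    obtain ⟨hI, hL⟩ := ih ((t, nc, wa, wb) :: R) (pvSg ws st (t, nc, wa, wb)) hstep hbal'
    constructor
    · simpa [List.reverse_cons, List.append_assoc] using hI
    · have hlen : (pvSg ws st (t, nc, wa, wb)).length = st.length - nc.toNat + 1 := by
        simp [pvSg]
      simp only [List.foldl_cons, List.map_cons, List.sum_cons] at hL ⊢
      have : pvPc4 (t, nc, wa, wb) = nc.toNat := rfl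
      simp only [List.length_cons]
      omega

-- ===== VERDICT (by name: the statement is the Claim_ definition above) =====
theorem eval_quorum_spec : Claim_equal_eval_quorum := by
  intro ops ws _ hpre
  obtain ⟨hw, hbal1, hbal2⟩ := hpre
  unfold Spec_eval_quorum
  simp only [eval_quorum, eval_quorum_alt]
  have hM := pv_mask_mem ws hw
  have hA := pv_A2S ws _ hM ops [] 0 le_rfl
  simp only [Int.toNat_zero, Nat.shiftRight_zero, zero_add] at hA
  rw [hA]
  rw [pv_tag_foldl ops [] 0, List.nil_append]
  -- run the forward simulation on the tagged list from the empty state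
  have hbalT : ∀ k < (pvTag ops 0).length, (((pvTag ops 0).take (k + 1)).map pvPc4).sum ≤
      (([] : List Int)).length + k := by
    intro k hk
    rw [pv_tag_length] at hk
    have h1 : ((pvTag ops 0).take (k + 1)).map pvPc4 =
        (ops.take (k + 1)).map pvNCh := by
      rw [List.map_take, pv_tag_pc, List.map_take]
    simpa [h1] using hbal1 k hk
  have hinv0 : pvINV ws ([] : List Int) ([] : List (Int × Int × Int × Int)) := rfl
  obtain ⟨hI, hL⟩ := pv_fwd ws (pvTag ops 0) [] [] hinv0 hbalT
  have hsum : ((pvTag ops 0).map pvPc4).sum = (ops.map pvNCh).sum := by rw [pv_tag_pc]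
  have hlen1 : ((pvTag ops 0).foldl (pvSg ws) []).length = 1 := by
    rw [pv_tag_length, hsum] at hL
    simp only [List.length_nil] at hL
    omega
  match hF : (pvTag ops 0).foldl (pvSg ws) ([] : List Int), hlen1 with
  | [v], _ =>
    rw [hF] at hI
    rw [List.append_nil] at hI
    obtain ⟨j, hnode, hrest⟩ := hI
    have hrest' : (pvTag ops 0).reverse.drop j = [] := hrest
    have hn := hnode ((pvTag ops 0).length + 1) (by simp)
    rw [hrest'] at hn
    rw [hn]
    simp
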